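-- pv_equiv track=rewrite | github.com/ogabasseyy/ekaette | sip_bridge/audio_codec.py | _linear_to_alaw
-- ===== SOURCE A (Python) =====
-- def _linear_to_alaw(sample: int) -> int:
--     """Encode a single PCM16 sample to A-law."""
--     clip = 0x7FFF
--     if sample >= 0:
--         mask = 0xD5
--     else:
--         mask = 0x55
--         sample = -sample - 1
--     if sample > clip:
--         sample = clip
--
--     sample >>= 4
--     segment_end = (0x1F, 0x3F, 0x7F, 0xFF, 0x1FF, 0x3FF, 0x7FF, 0xFFF)
--     segment = 0
--     while segment < len(segment_end) and sample > segment_end[segment]: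
--         segment += 1
--
--     if segment >= 8:
--         return 0x7F ^ mask
--
--     encoded = segment << 4
--     if segment < 2:
--         encoded |= sample & 0x0F
--     else:
--         encoded |= (sample >> (segment - 1)) & 0x0F
--     return encoded ^ mask
-- ===== SOURCE B (Python) =====
-- def _linear_to_alaw(sample: int) -> int:
--     """Encode a single PCM16 sample to A-law (closed-form segment via bit_length)."""
--     if sample >= 0:
--         mask = 0xD5
--     else:
--         mask = 0x55
--         sample = -sample - 1
--     sample = min(sample, 0x7FFF) >> 4
--     # segment_end[s] = 2**(s+5) - 1, so the scan stops at max(0, bit_length - 5)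
--     segment = max(0, sample.bit_length() - 5)
--     if segment < 2:
--         encoded = (segment << 4) | (sample & 0x0F)
--     else:
--         encoded = (segment << 4) | ((sample >> (segment - 1)) & 0x0F)
--     return encoded ^ mask
-- ===== Notes on version B (the rewrite author's own statement) =====
-- stated objective: idiomatic
-- what changed: Replaces the while-loop scan over the segment_end table with a closed-form segment computation max(0, sample.bit_length() - 5) (and drops the dead segment>=8 branch, unreachable after clipping), using min() for the clip.
import Mathlib
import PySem

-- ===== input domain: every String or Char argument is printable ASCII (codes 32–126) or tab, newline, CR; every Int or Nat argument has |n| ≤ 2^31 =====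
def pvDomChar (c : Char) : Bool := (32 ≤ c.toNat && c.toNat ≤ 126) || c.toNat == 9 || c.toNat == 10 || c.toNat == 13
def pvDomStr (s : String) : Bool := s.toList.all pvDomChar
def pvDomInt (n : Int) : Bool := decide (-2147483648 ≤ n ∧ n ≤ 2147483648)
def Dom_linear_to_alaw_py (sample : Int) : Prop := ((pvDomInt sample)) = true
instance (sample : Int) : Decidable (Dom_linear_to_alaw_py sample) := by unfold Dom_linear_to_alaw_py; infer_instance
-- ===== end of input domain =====

-- B replaces A's while-loop scan of the segment-end table by a closed-form
-- segment computation from bit_length (idiomatic/simpler; same constant cost).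

-- ===== PORT A =====
-- the while loop 'while segment < len(segment_end) and sample > segment_end[segment]: segment += 1',
-- transcribed as structural recursion over the remaining table entries
def segLoopA (sample : Int) : List Int → Int → Int
  | [], segment => segment
  | e :: rest, segment => if sample > e then segLoopA sample rest (segment + 1) else segment

def linear_to_alaw_py (sample : Int) : Int :=
  let clip : Int := 0x7FFF
  let mask : Int := if sample ≥ 0 then 0xD5 else 0x55
  let s0 : Int := if sample ≥ 0 then sample else -sample - 1
  let s1 : Int := if s0 > clip then clip else s0
  let s : Int := s1 >>> (4:Nat)
  let segment := segLoopA s [0x1F, 0x3F, 0x7F, 0xFF, 0x1FF, 0x3FF, 0x7FF, 0xFFF] 0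
  if segment ≥ 8 then PySem.Int.bxor 0x7F mask
  else
    let encoded := segment <<< 4
    -- (segment - 1).toNat is exact: in this branch 2 ≤ segment, the Python shift amount is positive
    let encoded := if segment < 2 then PySem.Int.bor encoded (PySem.Int.band s 0x0F)
                   else PySem.Int.bor encoded (PySem.Int.band (s >>> (segment - 1).toNat) 0x0F)
    PySem.Int.bxor encoded mask

-- ===== PORT B =====
def linear_to_alaw_py_alt (sample : Int) : Int :=
  let mask : Int := if sample ≥ 0 then 0xD5 else 0x55
  let s0 : Int := if sample ≥ 0 then sample else -sample - 1
  let s : Int := (min s0 0x7FFF) >>> (4:Nat)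
  let segment : Int := max 0 ((PySem.Int.bitLength s : Int) - 5)
  let encoded := if segment < 2 then PySem.Int.bor (segment <<< 4) (PySem.Int.band s 0x0F)
                 else PySem.Int.bor (segment <<< 4) (PySem.Int.band (s >>> (segment - 1).toNat) 0x0F)
  PySem.Int.bxor encoded mask

-- ===== PRECONDITION & SPEC =====
def Spec_linear_to_alaw_py (sample : Int) (out : Int) : Prop := out = linear_to_alaw_py_alt sample
instance (sample : Int) (out : Int) : Decidable (Spec_linear_to_alaw_py sample out) := by unfold Spec_linear_to_alaw_py; infer_instance

-- ===== CLAIM (what is proved, stated in full; the proofs are below) =====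
def Claim_equal_linear_to_alaw_py : Prop := ∀ (sample : Int), Dom_linear_to_alaw_py sample → Spec_linear_to_alaw_py sample (linear_to_alaw_py sample)

-- ===== LEMMAS AND PROOFS =====

-- the scan over the table equals the closed form, and stays below 8, for every shifted sample 0..2047
set_option maxRecDepth 8192 in
lemma seg_eq : ∀ n : Nat, n < 2048 →
    segLoopA (n : Int) [0x1F, 0x3F, 0x7F, 0xFF, 0x1FF, 0x3FF, 0x7FF, 0xFFF] 0
      = max 0 ((PySem.Int.bitLength (n : Int) : Int) - 5) := by decide

lemma bitLength_le_11 (n : Nat) (h : n < 2048) : PySem.Int.bitLength (n : Int) ≤ 11 := by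
  by_contra hlt
  rcases Nat.eq_zero_or_pos n with h0 | h0
  · subst h0; simp [PySem.Int.bitLength_zero] at hlt
  · have hne : (n : Int) ≠ 0 := by omega
    have h2 := PySem.Int.two_pow_bitLength_le (n : Int) hne
    have : (2 : Nat) ^ 11 ≤ 2 ^ (PySem.Int.bitLength (n : Int) - 1) :=
      Nat.pow_le_pow_right (by omega) (by omega)
    have hna : (n : Int).natAbs = n := by simp
    omega

lemma shift4_bounds (c : Int) (h0 : 0 ≤ c) (h1 : c ≤ 32767) :
    0 ≤ c >>> (4:Nat) ∧ c >>> (4:Nat) ≤ 2047 := by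
  rw [Int.shiftRight_eq_div_pow]
  norm_num
  omega

-- ===== VERDICT (by name: the statement is the Claim_ definition above) =====
theorem linear_to_alaw_py_spec : Claim_equal_linear_to_alaw_py := by
  intro sample _
  unfold Spec_linear_to_alaw_py linear_to_alaw_py linear_to_alaw_py_alt
  simp only []
  set mask : Int := if sample ≥ 0 then (0xD5 : Int) else 0x55 with hmask
  set s0 : Int := if sample ≥ 0 then sample else -sample - 1 with hs0
  have hs0nn : 0 ≤ s0 := by rw [hs0]; split <;> omega
  have hclip : (if s0 > (0x7FFF : Int) then (0x7FFF : Int) else s0) = min s0 0x7FFF := by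
    rw [min_def]; split <;> split <;> omega
  rw [hclip]
  set c : Int := min s0 0x7FFF with hc
  have hcb : 0 ≤ c ∧ c ≤ 32767 := by rw [hc, min_def]; split <;> omega
  obtain ⟨h0, h1⟩ := shift4_bounds c hcb.1 hcb.2
  set s : Int := c >>> (4:Nat) with hs
  obtain ⟨n, hn⟩ : ∃ n : Nat, s = (n : Int) := ⟨s.toNat, (Int.toNat_of_nonneg h0).symm⟩
  have hn2 : n < 2048 := by omega
  rw [hn, seg_eq n hn2]
  have : ¬ (max 0 ((PySem.Int.bitLength (n : Int) : Int) - 5) ≥ 8) := by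
    have := bitLength_le_11 n hn2; omega
  rw [if_neg this]
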